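-- pv_equiv track=rewrite | github.com/kimminho0428/pythonProject | 프로그래머스 문제모음/test2.py | solution
-- ===== SOURCE A (Python) =====
-- def solution(M, load):
--     answer = 0
--     truck = []
--     load.sort()
--
--     while len(load):
--         truck.append(load.pop(0))
--         if sum(truck) >= M:
--             answer += 1
--         else:
--             truck.append(load.pop(0))
--
--     return answer
-- ===== SOURCE B (Python) =====
-- def solution(M, load):
--     # Build the prefix-sum table of the sorted loads once, then walk indices,
--     # jumping 1 (counted step) or 2 (extra element taken) -- no list mutation,
--     # no re-summing, no per-element state machine.
--     p = [0]
--     for x in sorted(load):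
--         p.append(p[-1] + x)
--     n = len(p) - 1
--     answer = 0
--     i = 0
--     while i < n:
--         if p[i + 1] >= M:
--             answer += 1
--             i += 1
--         else:
--             i += 2
--     return answer
-- ===== Notes on version B (the rewrite author's own statement) =====
-- stated objective: faster
-- what changed: B builds the prefix-sum table of sorted(load) once and then walks indices over it, jumping by 1 (counted step) or 2 (extra element taken), instead of A's loop that mutates load by popping its front and re-sums the growing truck list every iteration; B does not mutate load.
import Mathlib
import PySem

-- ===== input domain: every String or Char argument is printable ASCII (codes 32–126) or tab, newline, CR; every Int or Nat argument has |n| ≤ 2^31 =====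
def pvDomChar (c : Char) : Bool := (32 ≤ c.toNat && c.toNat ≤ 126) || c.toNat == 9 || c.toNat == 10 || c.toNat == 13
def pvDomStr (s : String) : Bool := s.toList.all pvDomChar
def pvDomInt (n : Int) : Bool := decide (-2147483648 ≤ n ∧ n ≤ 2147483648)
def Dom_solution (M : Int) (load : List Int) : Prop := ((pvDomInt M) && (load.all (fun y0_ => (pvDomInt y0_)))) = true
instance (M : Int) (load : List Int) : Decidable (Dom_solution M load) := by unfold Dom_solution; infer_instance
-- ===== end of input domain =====

-- B precomputes the prefix-sum table of sorted(load) once and then walks indices over it,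
-- jumping by 1 or 2 (objective: faster). NOTE: Python A sorts and empties `load` in place,
-- B does not mutate it; the equivalence proved here is about the RETURN value only.

-- ===== PORT A =====
-- while len(load): truck.append(load.pop(0)); if sum(truck) >= M: answer += 1 else: truck.append(load.pop(0))
def solLoopA (M answer : Int) (truck : List Int) : List Int → Int
  | [] => answer
  | a :: rest =>
    let truck' := truck ++ [a]              -- truck.append(load.pop(0))
    if truck'.sum ≥ M then                  -- if sum(truck) >= M
      solLoopA M (answer + 1) truck' rest
    else
      match rest with
      | [] => answer                        -- Python raises IndexError here (pop(0) on []); excluded by Pre_solution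
      | b :: rest' => solLoopA M answer (truck' ++ [b]) rest'

def solution (M : Int) (load : List Int) : Int :=
  solLoopA M 0 [] (PySem.List.sorted load (fun x => x) false)   -- load.sort()

-- ===== PORT B =====
-- p = [0]; for x in sorted(load): p.append(p[-1] + x)   (running last value carried as s)
def prefB (s : Int) : List Int → List Int
  | [] => [s]
  | x :: xs => s :: prefB (s + x) xs

-- while i < n: if p[i+1] >= M: answer += 1; i += 1 else: i += 2
-- p[i+1] is always in range when read (i < n, p.length = n+1), so getD is exact here
def walkB (M : Int) (p : List Int) (n i : Nat) (answer : Int) : Int :=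
  if _h : i < n then
    if p.getD (i + 1) 0 ≥ M then walkB M p n (i + 1) (answer + 1)
    else walkB M p n (i + 2) answer
  else answer
  termination_by n - i

def solution_alt (M : Int) (load : List Int) : Int :=
  let L := PySem.List.sorted load (fun x => x) false
  walkB M (prefB 0 L) L.length 0 0

-- ===== PRECONDITION & SPEC =====
-- Pre_ excludes exactly the inputs on which A raises IndexError (the second pop(0) hitting an
-- empty list). Whether that happens is inherently a property of A's sequential two-at-a-time
-- consumption of the sorted list, so it is stated as this minimal recursion over the sorted
-- list; it computes no output and is not a copy of either port.
def consumeOK (M s : Int) : List Int → Bool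
  | [] => true
  | [a] => decide (s + a ≥ M)
  | a :: b :: rest => if s + a ≥ M then consumeOK M (s + a) (b :: rest) else consumeOK M (s + a + b) rest

def Pre_solution (M : Int) (load : List Int) : Prop :=
  consumeOK M 0 (PySem.List.sorted load (fun x => x) false) = true
instance (M : Int) (load : List Int) : Decidable (Pre_solution M load) := by unfold Pre_solution; infer_instance

def pvWitness_solution : Int × List Int := (1, [2])

def Spec_solution (M : Int) (load : List Int) (out : Int) : Prop := out = solution_alt M load
instance (M : Int) (load : List Int) (out : Int) : Decidable (Spec_solution M load out) := by unfold Spec_solution; infer_instance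

-- ===== CLAIM (what is proved, stated in full; the proofs are below) =====
def Claim_equal_solution : Prop := ∀ (M : Int) (load : List Int), Dom_solution M load → Pre_solution M load → Spec_solution M load (solution M load)

-- ===== LEMMAS AND PROOFS =====

lemma prefB_getD (L : List Int) : ∀ (s : Int) (i : Nat), i ≤ L.length →
    (prefB s L).getD i 0 = s + (L.take i).sum := by
  induction L with
  | nil =>
    intro s i h
    have : i = 0 := by simpa using h
    subst this; simp [prefB]
  | cons x xs ih =>
    intro s i h
    cases i with
    | zero => simp [prefB]
    | succ j =>
      have hx := ih (s + x) j (by simpa using h)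
      simp only [prefB, List.getD, List.getElem?_cons_succ, List.take_succ_cons, List.sum_cons]
      simp only [List.getD] at hx
      rw [hx]; ring

lemma take_drop_sum (L : List Int) (i : Nat) (a : Int) (rest : List Int)
    (hd : L.drop i = a :: rest) : (L.take (i + 1)).sum = (L.take i).sum + a := by
  have hget : L[i]? = some a := by
    have h0 := List.getElem?_drop (xs := L) (i := i) (j := 0)
    rw [hd] at h0
    simpa using h0.symm
  rw [List.take_add_one, hget]
  simp

-- The walk from index i over the prefix table equals A's loop on the remaining suffix.
lemma walk_eq_loopA (M : Int) (L : List Int) : ∀ (n : Nat) (xs : List Int), xs.length ≤ n →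
    ∀ (i : Nat) (s ans : Int) (truck : List Int),
    L.drop i = xs → (L.take i).sum = s → truck.sum = s →
    consumeOK M s xs = true →
    walkB M (prefB 0 L) L.length i ans = solLoopA M ans truck xs := by
  intro n
  induction n with
  | zero =>
    intro xs hlen i s ans truck hdrop htake _ _
    have hx : xs = [] := List.eq_nil_of_length_eq_zero (Nat.le_zero.mp hlen)
    subst hx
    have hi : L.length ≤ i := List.drop_eq_nil_iff.mp hdrop
    rw [walkB]
    simp [solLoopA, Nat.not_lt.mpr hi]
  | succ n ih =>
    intro xs hlen i s ans truck hdrop htake hsum hok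
    match xs with
    | [] =>
      have hi : L.length ≤ i := List.drop_eq_nil_iff.mp hdrop
      rw [walkB]
      simp [solLoopA, Nat.not_lt.mpr hi]
    | a :: rest =>
      have hi : i < L.length := by
        by_contra h
        have : L.drop i = [] := List.drop_eq_nil_iff.mpr (by omega)
        simp [this] at hdrop
      have hts : (L.take (i + 1)).sum = s + a := by
        rw [take_drop_sum L i a rest hdrop, htake]
      have hp1 : (prefB 0 L).getD (i + 1) 0 = s + a := by
        rw [prefB_getD L 0 (i + 1) (by omega), hts]; ring
      have hdrop1 : L.drop (i + 1) = rest := by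
        have h1 := List.drop_drop (i := 1) (j := i) (l := L)
        rw [hdrop] at h1
        simpa using h1.symm
      rw [walkB]
      by_cases hc : M ≤ s + a
      · have hok' : consumeOK M (s + a) rest = true := by
          match rest with
          | [] => simp [consumeOK]
          | b :: rest' => simpa [consumeOK, hc] using hok
        have hrec := ih rest (by simp at hlen; omega) (i + 1) (s + a) (ans + 1)
          (truck ++ [a]) hdrop1 hts (by simp [hsum]) hok'
        have hstep : solLoopA M ans truck (a :: rest) = solLoopA M (ans + 1) (truck ++ [a]) rest := by
          conv_lhs => rw [solLoopA.eq_def]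
          dsimp only
          rw [if_pos (by simpa [List.sum_append, hsum] using hc)]
        rw [hstep]
        have hp1' : (prefB 0 L)[i + 1]?.getD 0 = s + a := by simpa [List.getD] using hp1
        simpa [hi, hp1', hc] using hrec
      · match rest with
        | [] =>
          exfalso
          have : decide (s + a ≥ M) = true := by simpa [consumeOK] using hok
          simp at this; exact hc this
        | b :: rest' =>
          have hok' : consumeOK M (s + a + b) rest' = true := by
            simpa [consumeOK, hc] using hok
          have hts2 : (L.take (i + 2)).sum = s + a + b := by
            rw [take_drop_sum L (i + 1) b rest' hdrop1, hts]
          have hdrop2 : L.drop (i + 2) = rest' := by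
            have h1 := List.drop_drop (i := 1) (j := i + 1) (l := L)
            rw [hdrop1] at h1
            simpa using h1.symm
          have hrec := ih rest' (by simp at hlen; omega) (i + 2) (s + a + b) ans
            ((truck ++ [a]) ++ [b]) hdrop2 hts2 (by simp [hsum]; ring) hok'
          have hstep : solLoopA M ans truck (a :: b :: rest') = solLoopA M ans ((truck ++ [a]) ++ [b]) rest' := by
            conv_lhs => rw [solLoopA.eq_def]
            dsimp only
            rw [if_neg (by simpa [List.sum_append, hsum] using hc)]
          rw [hstep]
          have hp1' : (prefB 0 L)[i + 1]?.getD 0 = s + a := by simpa [List.getD] using hp1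
          simpa [hi, hp1', hc] using hrec

-- ===== VERDICT (by name: the statement is the Claim_ definition above) =====
theorem solution_spec : Claim_equal_solution := by
  intro M load _ hpre
  unfold Spec_solution solution solution_alt
  exact (walk_eq_loopA M _ _ _ le_rfl 0 0 0 [] rfl rfl rfl hpre).symm ▸ rfl
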